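-- pv_equiv track=rewrite | github.com/segnig/E2Exam-Telegram-bot | text_format.py | format_days_left_in_emoji_clock
-- ===== SOURCE A (Python) =====
-- emoji_clock_font = {
--     '0': ["⬛⬛⬛", "⬛⬜⬛", "⬛⬜⬛", "⬛⬜⬛", "⬛⬛⬛"],
--     '1': ["⬜⬜⬛", "⬜⬜⬛", "⬜⬜⬛", "⬜⬜⬛", "⬜⬜⬛"],
--     '2': ["⬛⬛⬛", "⬜⬜⬛", "⬛⬛⬛", "⬛⬜⬜", "⬛⬛⬛"],
--     '3': ["⬛⬛⬛", "⬜⬜⬛", "⬛⬛⬛", "⬜⬜⬛", "⬛⬛⬛"],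
--     '4': ["⬛⬜⬛", "⬛⬜⬛", "⬛⬛⬛", "⬜⬜⬛", "⬜⬜⬜"],
--     '5': ["⬛⬛⬛", "⬛⬜⬜", "⬛⬛⬛", "⬜⬜⬛", "⬛⬛⬛"],
--     '6': ["⬛⬛⬛", "⬛⬜⬜", "⬛⬛⬛", "⬛⬜⬛", "⬛⬛⬛"],
--     '7': ["⬛⬛⬛", "⬜⬜⬛", "⬜⬜⬛", "⬜⬜⬛", "⬜⬜⬛"],
--     '8': ["⬛⬛⬛", "⬛⬜⬛", "⬛⬛⬛", "⬛⬜⬛", "⬛⬛⬛"],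
--     '9': ["⬛⬛⬛", "⬛⬜⬛", "⬛⬛⬛", "⬜⬜⬛", "⬛⬛⬛"]
-- }
--
-- def format_days_left_in_emoji_clock(days_left):
--     days_string = f"{days_left:03}"
--     lines = ["⬜", "⬜", "⬜", "⬜", "⬜"]
--
--     for char in days_string:
--         if char in emoji_clock_font:
--             for i in range(5):
--                 lines[i] += emoji_clock_font[char][i] + "⬜"
--
--     return "\n".join(lines)
-- ===== SOURCE B (Python) =====
-- # Digit glyphs stored as fifteen-bit bitmasks (bit 3*i+j set = black cell at row i, col j)
-- # instead of lists of row strings; the art is decoded bit by bit, row-major.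
-- _FONT_BITS = {
--     '0': 31599, '1': 18724, '2': 29671, '3': 31207, '4': 2541,
--     '5': 31183, '6': 31695, '7': 18727, '8': 31727, '9': 31215,
-- }
--
-- def format_days_left_in_emoji_clock(days_left):
--     masks = [_FONT_BITS[c] for c in f"{days_left:03}" if c in _FONT_BITS]
--     lines = []
--     for i in range(5):
--         line = "⬜"
--         for m in masks:
--             for j in range(3):
--                 line += "⬛" if m // 2 ** (3 * i + j) % 2 else "⬜"
--             line += "⬜"
--         lines.append(line)
--     return "\n".join(lines)
-- ===== Notes on version B (the rewrite author's own statement) =====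
-- stated objective: alternative
-- what changed: B stores each digit glyph as a single fifteen-bit integer bitmask and renders the art by decoding one bit per cell (row-major), instead of A's dict of per-row glyph strings concatenated char-major into a seeded mutable lines list.
import Mathlib
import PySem

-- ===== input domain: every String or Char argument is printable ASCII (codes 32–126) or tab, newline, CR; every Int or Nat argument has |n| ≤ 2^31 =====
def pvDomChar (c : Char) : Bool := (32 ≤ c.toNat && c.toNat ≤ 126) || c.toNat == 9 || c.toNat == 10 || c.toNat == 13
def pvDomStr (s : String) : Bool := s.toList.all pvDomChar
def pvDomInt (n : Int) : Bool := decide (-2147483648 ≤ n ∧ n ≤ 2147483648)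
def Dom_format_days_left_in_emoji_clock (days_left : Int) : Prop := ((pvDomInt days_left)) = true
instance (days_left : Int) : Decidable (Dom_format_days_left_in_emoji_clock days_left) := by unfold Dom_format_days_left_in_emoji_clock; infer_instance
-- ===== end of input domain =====

-- B stores each digit glyph as one fifteen-bit integer bitmask and decodes the art one bit per cell,
-- row-major, instead of A's dict of per-row glyph strings appended char-major into seeded lines.

-- ===== PORT A =====
-- A's module-level dict of per-row glyph strings
def emoji_clock_font : PySem.Dict Char (List String) := PySem.Dict.ofList
  [ ('0', ["⬛⬛⬛", "⬛⬜⬛", "⬛⬜⬛", "⬛⬜⬛", "⬛⬛⬛"])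
  , ('1', ["⬜⬜⬛", "⬜⬜⬛", "⬜⬜⬛", "⬜⬜⬛", "⬜⬜⬛"])
  , ('2', ["⬛⬛⬛", "⬜⬜⬛", "⬛⬛⬛", "⬛⬜⬜", "⬛⬛⬛"])
  , ('3', ["⬛⬛⬛", "⬜⬜⬛", "⬛⬛⬛", "⬜⬜⬛", "⬛⬛⬛"])
  , ('4', ["⬛⬜⬛", "⬛⬜⬛", "⬛⬛⬛", "⬜⬜⬛", "⬜⬜⬜"])
  , ('5', ["⬛⬛⬛", "⬛⬜⬜", "⬛⬛⬛", "⬜⬜⬛", "⬛⬛⬛"])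
  , ('6', ["⬛⬛⬛", "⬛⬜⬜", "⬛⬛⬛", "⬛⬜⬛", "⬛⬛⬛"])
  , ('7', ["⬛⬛⬛", "⬜⬜⬛", "⬜⬜⬛", "⬜⬜⬛", "⬜⬜⬛"])
  , ('8', ["⬛⬛⬛", "⬛⬜⬛", "⬛⬛⬛", "⬛⬜⬛", "⬛⬛⬛"])
  , ('9', ["⬛⬛⬛", "⬛⬜⬛", "⬛⬛⬛", "⬜⬜⬛", "⬛⬛⬛"]) ]

-- f"{days_left:03}" = str(days_left).zfill(3) for ints (zero-pad after the sign); shared by both Pythons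
def pvPad3 (n : Int) : String := PySem.Str.zfill (PySem.Int.toStr n) 3

def format_days_left_in_emoji_clock (days_left : Int) : String :=
  let days_string := pvPad3 days_left
  let lines : List String := ["⬜", "⬜", "⬜", "⬜", "⬜"]
  let lines := days_string.toList.foldl (fun ls c =>
    if PySem.Dict.contains emoji_clock_font c then
      -- lines[i] += emoji_clock_font[char][i] + "⬜"; i < 5 always, so getD/set are exact here
      (List.range 5).foldl (fun ls i =>
        ls.set i (ls.getD i "" ++ ((PySem.Dict.getD emoji_clock_font c []).getD i "" ++ "⬜"))) ls
    else ls) lines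
  PySem.Str.join "\n" lines

-- ===== PORT B =====
-- B's module-level dict of fifteen-bit glyph bitmasks (bit 3*i+j = black cell at row i, column j)
def emoji_font_bits : PySem.Dict Char Int := PySem.Dict.ofList
  [ ('0', 31599), ('1', 18724), ('2', 29671), ('3', 31207), ('4', 2541)
  , ('5', 31183), ('6', 31695), ('7', 18727), ('8', 31727), ('9', 31215) ]

def format_days_left_in_emoji_clock_alt (days_left : Int) : String :=
  -- masks = [_FONT_BITS[c] for c in f"{days_left:03}" if c in _FONT_BITS]
  let masks := (pvPad3 days_left).toList.filterMap (fun c => PySem.Dict.get? emoji_font_bits c)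
  let lines := (List.range 5).foldl (fun acc i =>
    acc ++ [masks.foldl (fun line m =>
      ((List.range 3).foldl (fun l j =>
        l ++ (if PySem.Int.mod (PySem.Int.floordiv m ((2:Int) ^ (3 * i + j))) 2 ≠ 0 then "⬛" else "⬜")) line) ++ "⬜") "⬜"]) ([] : List String)
  PySem.Str.join "\n" lines

-- ===== PRECONDITION & SPEC =====
def Spec_format_days_left_in_emoji_clock (days_left : Int) (out : String) : Prop := out = format_days_left_in_emoji_clock_alt days_left
instance (days_left : Int) (out : String) : Decidable (Spec_format_days_left_in_emoji_clock days_left out) := by unfold Spec_format_days_left_in_emoji_clock; infer_instance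

-- ===== CLAIM (what is proved, stated in full; the proofs are below) =====
def Claim_equal_format_days_left_in_emoji_clock : Prop := ∀ (days_left : Int), Dom_format_days_left_in_emoji_clock days_left → Spec_format_days_left_in_emoji_clock days_left (format_days_left_in_emoji_clock days_left)

-- ===== LEMMAS AND PROOFS =====

-- row i of the rendering of cs's digit glyphs (without the leading "⬜"), A-side (glyph strings)
def pvTail (cs : List Char) (i : Nat) : String :=
  PySem.Str.join "" ((cs.filterMap (fun c => PySem.Dict.get? emoji_clock_font c)).map
    (fun b => b.getD i "" ++ "⬜"))

-- one bit of a mask, as B prints it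
def pvBit (m : Int) (k : Nat) : String :=
  if PySem.Int.mod (PySem.Int.floordiv m ((2:Int) ^ k)) 2 ≠ 0 then "⬛" else "⬜"

-- the three cells + separator one mask contributes to row i
def pvChunk (m : Int) (i : Nat) : String :=
  pvBit m (3 * i + 0) ++ (pvBit m (3 * i + 1) ++ (pvBit m (3 * i + 2) ++ "⬜"))

-- row i of the rendering of the masks ms, B-side (bit decoding)
def pvCat (ms : List Int) (i : Nat) : String :=
  match ms with
  | [] => ""
  | m :: t => pvChunk m i ++ pvCat t i

lemma pv_join_empty_cons (x : String) (l : List String) :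
    PySem.Str.join "" (x :: l) = x ++ PySem.Str.join "" l := by
  cases l <;> simp [PySem.Str.join, PySem.Chars.join_nil, PySem.Chars.join_singleton,
    PySem.Chars.join_cons_cons]

lemma pvTail_cons_some (c : Char) (cs : List Char) (i : Nat) (blk : List String)
    (h : PySem.Dict.get? emoji_clock_font c = some blk) :
    pvTail (c :: cs) i = (blk.getD i "" ++ "⬜") ++ pvTail cs i := by
  simp [pvTail, h, pv_join_empty_cons]

lemma pvTail_cons_none (c : Char) (cs : List Char) (i : Nat)
    (h : PySem.Dict.get? emoji_clock_font c = none) :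
    pvTail (c :: cs) i = pvTail cs i := by
  simp [pvTail, h]

-- one character's inner range-5 fold in A, evaluated on an explicit 5-line state
lemma pv_step (blk : List String) (a b c d e : String) :
    (List.range 5).foldl (fun ls i =>
        ls.set i (ls.getD i "" ++ (blk.getD i "" ++ "⬜"))) [a, b, c, d, e] =
      [a ++ (blk.getD 0 "" ++ "⬜"), b ++ (blk.getD 1 "" ++ "⬜"), c ++ (blk.getD 2 "" ++ "⬜"),
       d ++ (blk.getD 3 "" ++ "⬜"), e ++ (blk.getD 4 "" ++ "⬜")] := rfl

-- A's char-major fold, started from any five lines, appends pvTail row-wise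
lemma pv_core (cs : List Char) (a b c d e : String) :
    cs.foldl (fun ls ch =>
      if PySem.Dict.contains emoji_clock_font ch then
        (List.range 5).foldl (fun ls i =>
          ls.set i (ls.getD i "" ++ ((PySem.Dict.getD emoji_clock_font ch []).getD i "" ++ "⬜"))) ls
      else ls) [a, b, c, d, e] =
    [a ++ pvTail cs 0, b ++ pvTail cs 1, c ++ pvTail cs 2, d ++ pvTail cs 3, e ++ pvTail cs 4] := by
  induction cs generalizing a b c d e with
  | nil => simp [pvTail, PySem.Str.join, PySem.Chars.join_nil]
  | cons ch cs ih =>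
    rw [List.foldl_cons]
    cases hg : PySem.Dict.get? emoji_clock_font ch with
    | none =>
      have hc : PySem.Dict.contains emoji_clock_font ch = false := by
        rw [PySem.Dict.contains_eq_isSome_get?, hg]; rfl
      simp only [hc, if_neg Bool.false_ne_true, ih, pvTail_cons_none ch cs _ hg]
    | some blk =>
      have hc : PySem.Dict.contains emoji_clock_font ch = true := by
        rw [PySem.Dict.contains_eq_isSome_get?, hg]; rfl
      have hd : PySem.Dict.getD emoji_clock_font ch [] = blk :=
        PySem.Dict.getD_of_get?_eq_some _ [] hg
      simp only [hc, if_true, hd]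
      rw [pv_step, ih]
      have ht := fun i => pvTail_cons_some ch cs i blk hg
      simp only [ht, String.append_assoc]

-- the two font tables agree key by key: the bit decoding of a mask is the glyph row + separator
set_option maxHeartbeats 2000000 in
lemma pv_char (c : Char) (i : Nat) (hi : i < 5) :
    (PySem.Dict.get? emoji_font_bits c).map (fun m => pvChunk m i)
      = (PySem.Dict.get? emoji_clock_font c).map (fun b => b.getD i "" ++ "⬜") := by
  have hb : emoji_font_bits = PySem.Dict.mk
    [ ('0', 31599), ('1', 18724), ('2', 29671), ('3', 31207), ('4', 2541)
    , ('5', 31183), ('6', 31695), ('7', 18727), ('8', 31727), ('9', 31215) ] := rfl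
  have hf : emoji_clock_font = PySem.Dict.mk
    [ ('0', ["⬛⬛⬛", "⬛⬜⬛", "⬛⬜⬛", "⬛⬜⬛", "⬛⬛⬛"])
    , ('1', ["⬜⬜⬛", "⬜⬜⬛", "⬜⬜⬛", "⬜⬜⬛", "⬜⬜⬛"])
    , ('2', ["⬛⬛⬛", "⬜⬜⬛", "⬛⬛⬛", "⬛⬜⬜", "⬛⬛⬛"])
    , ('3', ["⬛⬛⬛", "⬜⬜⬛", "⬛⬛⬛", "⬜⬜⬛", "⬛⬛⬛"])
    , ('4', ["⬛⬜⬛", "⬛⬜⬛", "⬛⬛⬛", "⬜⬜⬛", "⬜⬜⬜"])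
    , ('5', ["⬛⬛⬛", "⬛⬜⬜", "⬛⬛⬛", "⬜⬜⬛", "⬛⬛⬛"])
    , ('6', ["⬛⬛⬛", "⬛⬜⬜", "⬛⬛⬛", "⬛⬜⬛", "⬛⬛⬛"])
    , ('7', ["⬛⬛⬛", "⬜⬜⬛", "⬜⬜⬛", "⬜⬜⬛", "⬜⬜⬛"])
    , ('8', ["⬛⬛⬛", "⬛⬜⬛", "⬛⬛⬛", "⬛⬜⬛", "⬛⬛⬛"])
    , ('9', ["⬛⬛⬛", "⬛⬜⬛", "⬛⬛⬛", "⬜⬜⬛", "⬛⬛⬛"]) ] := rfl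
  rw [hb, hf]
  simp only [PySem.Dict.get?_mk_cons]
  split_ifs <;> (try rfl) <;> interval_cases i <;> rfl

-- B's inner mask fold appends pvCat of the masks
lemma pvB_fold (ms : List Int) (i : Nat) (s : String) :
    ms.foldl (fun line m =>
      ((List.range 3).foldl (fun l j =>
        l ++ (if PySem.Int.mod (PySem.Int.floordiv m ((2:Int) ^ (3 * i + j))) 2 ≠ 0 then "⬛" else "⬜")) line) ++ "⬜") s
    = s ++ pvCat ms i := by
  induction ms generalizing s with
  | nil => simp [pvCat]
  | cons m t ih =>
    rw [List.foldl_cons, ih, pvCat]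
    show ((((s ++ pvBit m (3*i+0)) ++ pvBit m (3*i+1)) ++ pvBit m (3*i+2)) ++ "⬜") ++ pvCat t i = _
    simp only [pvChunk, String.append_assoc]

-- B's bit decoding of the looked-up masks equals A's glyph-row tail
lemma pv_cat_tail (cs : List Char) (i : Nat) (hi : i < 5) :
    pvCat (cs.filterMap (fun c => PySem.Dict.get? emoji_font_bits c)) i = pvTail cs i := by
  induction cs with
  | nil => simp [pvCat, pvTail, PySem.Str.join, PySem.Chars.join_nil]
  | cons c cs ih =>
    have hc := pv_char c i hi
    cases hg : PySem.Dict.get? emoji_clock_font c with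
    | none =>
      rw [hg] at hc
      cases hb : PySem.Dict.get? emoji_font_bits c with
      | none => simp only [List.filterMap_cons, hb, ih, pvTail_cons_none c cs _ hg]
      | some m => rw [hb] at hc; simp at hc
    | some blk =>
      rw [hg] at hc
      cases hb : PySem.Dict.get? emoji_font_bits c with
      | none => rw [hb] at hc; simp at hc
      | some m =>
        rw [hb] at hc
        simp only [Option.map_some] at hc
        have hm : pvChunk m i = blk.getD i "" ++ "⬜" := by injection hc
        simp only [List.filterMap_cons, hb, pvCat, hm, ih, pvTail_cons_some c cs i blk hg]

-- ===== VERDICT (by name: the statement is the Claim_ definition above) =====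
theorem format_days_left_in_emoji_clock_spec : Claim_equal_format_days_left_in_emoji_clock := by
  intro n _
  unfold Spec_format_days_left_in_emoji_clock
  unfold format_days_left_in_emoji_clock format_days_left_in_emoji_clock_alt
  dsimp only
  rw [pv_core]
  show PySem.Str.join "\n" _ = PySem.Str.join "\n" ([] ++ [_] ++ [_] ++ [_] ++ [_] ++ [_])
  rw [pvB_fold, pvB_fold, pvB_fold, pvB_fold, pvB_fold]
  rw [pv_cat_tail _ 0 (by norm_num), pv_cat_tail _ 1 (by norm_num), pv_cat_tail _ 2 (by norm_num),
      pv_cat_tail _ 3 (by norm_num), pv_cat_tail _ 4 (by norm_num)]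
  rfl
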